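-- pv_equiv track=rewrite | github.com/IvoNet/advent-of-code | ivonet/iter.py | four_way_split
-- ===== SOURCE A (Python) =====
-- from typing import Generator, Sized, Callable, Iterable
--
-- def combinations(a, n):
--     if n == 1:
--         for x in a:
--             yield [x]
--     else:
--         for i in range(len(a)):
--             for x in combinations(a[:i] + a[i + 1:], n - 1):
--                 yield [a[i]] + x
--
-- def permutations(a):
--     return combinations(a, len(a))
--
-- def four_way_split(n: int, first: int = 1, inclusive: bool = False) -> Generator:
--     """Yields a new 4 way split of the number provided as n"""
--     addition = 0
--     if inclusive:
--         addition = 1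
--     for i in range(first, n + addition):
--         for j in range(i, n + addition):
--             for k in range(j, n + addition):
--                 for l in range(k, n + addition):
--                     if i + j + k + l == n:
--                         if i == j == k == l:
--                             yield i, j, k, l
--                             continue
--                         for a, b, c, d in permutations((i, j, k, l)):
--                             yield a, b, c, d
-- ===== SOURCE B (Python) =====
-- def four_way_split(n: int, first: int = 1, inclusive: bool = False):
--     """Yields a new 4 way split of the number provided as n"""
--     hi = n + (1 if inclusive else 0)
--     for i in range(first, hi):
--         for j in range(i, hi):
--             for k in range(j, hi):
--                 l = n - i - j - k
--                 if k <= l < hi: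
--                     if i == j == k == l:
--                         yield i, j, k, l
--                         continue
--                     t = (i, j, k, l)
--                     for p in range(4):
--                         for q in range(4):
--                             if q == p:
--                                 continue
--                             for r in range(4):
--                                 if r == p or r == q:
--                                     continue
--                                 s = 6 - p - q - r
--                                 yield t[p], t[q], t[r], t[s]
-- ===== Notes on version B (the rewrite author's own statement) =====
-- stated objective: alternative
-- what changed: B drops A's innermost loop by solving l = n-i-j-k directly with a range bound-check, and replaces A's recursive element-removal permutation generator with direct nested loops over distinct index positions.
import Mathlib
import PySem

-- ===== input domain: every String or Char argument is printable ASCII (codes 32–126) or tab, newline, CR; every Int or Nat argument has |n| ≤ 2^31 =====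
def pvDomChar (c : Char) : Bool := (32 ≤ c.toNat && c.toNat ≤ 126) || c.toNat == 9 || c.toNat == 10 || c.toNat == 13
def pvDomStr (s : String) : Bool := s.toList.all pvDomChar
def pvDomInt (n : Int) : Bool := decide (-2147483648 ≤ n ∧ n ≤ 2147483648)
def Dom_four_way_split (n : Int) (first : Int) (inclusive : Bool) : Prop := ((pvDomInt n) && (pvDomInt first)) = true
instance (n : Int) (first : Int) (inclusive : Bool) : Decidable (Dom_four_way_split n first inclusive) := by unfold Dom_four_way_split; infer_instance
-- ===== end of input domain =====

-- B computes the fourth summand l = n-i-j-k directly with a bound-check (dropping A's innermost loop)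
-- and enumerates the 24 index permutations with nested loops instead of A's recursive generator.


-- ===== PORT A =====
-- combinations(a, n): recursion on n (Python recurses with n-1 down to the n == 1 base case;
-- for n = 0 both the Python and this port yield nothing). a[:i] + a[i+1:] with 0 ≤ i < len(a)
-- is exactly a.take i ++ a.drop (i+1); a[i] with 0 ≤ i < len(a) is exactly a.getD i 0.
def fws_combinations (a : List Int) : Nat → List (List Int)
  | 0 => []
  | 1 => a.map (fun x => [x])
  | (m+2) => (List.range a.length).flatMap fun i =>
      (fws_combinations (a.take i ++ a.drop (i+1)) (m+1)).map (fun x => a.getD i 0 :: x)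

def fws_permutations (a : List Int) : List (List Int) :=
  fws_combinations a a.length

def four_way_split (n : Int) (first : Int) (inclusive : Bool) : List (List Int) :=
  let addition : Int := if inclusive then 1 else 0
  (PySem.List.pyRange first (n + addition) 1).flatMap fun i =>
  (PySem.List.pyRange i (n + addition) 1).flatMap fun j =>
  (PySem.List.pyRange j (n + addition) 1).flatMap fun k =>
  (PySem.List.pyRange k (n + addition) 1).flatMap fun l =>
    if i + j + k + l = n then
      if i = j ∧ j = k ∧ k = l then [[i, j, k, l]]
      else fws_permutations [i, j, k, l]
    else []

-- ===== PORT B =====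
-- t[p] with 0 ≤ p < 4 is exactly t.getD p 0; 6-p-q-r never underflows on the reached p,q,r.
def four_way_split_alt (n : Int) (first : Int) (inclusive : Bool) : List (List Int) :=
  let hi : Int := n + (if inclusive then 1 else 0)
  (PySem.List.pyRange first hi 1).flatMap fun i =>
  (PySem.List.pyRange i hi 1).flatMap fun j =>
  (PySem.List.pyRange j hi 1).flatMap fun k =>
    let l := n - i - j - k
    if k ≤ l ∧ l < hi then
      if i = j ∧ j = k ∧ k = l then [[i, j, k, l]]
      else
        let t := [i, j, k, l]
        (List.range 4).flatMap fun p =>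
        (List.range 4).flatMap fun q =>
          if q = p then [] else
          (List.range 4).flatMap fun r =>
            if r = p ∨ r = q then [] else
            let s := 6 - p - q - r
            [[t.getD p 0, t.getD q 0, t.getD r 0, t.getD s 0]]
    else []

-- ===== PRECONDITION & SPEC =====
def Spec_four_way_split (n : Int) (first : Int) (inclusive : Bool) (out : List (List Int)) : Prop := out = four_way_split_alt n first inclusive
instance (n : Int) (first : Int) (inclusive : Bool) (out : List (List Int)) : Decidable (Spec_four_way_split n first inclusive out) := by unfold Spec_four_way_split; infer_instance

-- ===== CLAIM (what is proved, stated in full; the proofs are below) =====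
def Claim_equal_four_way_split : Prop := ∀ (n : Int) (first : Int) (inclusive : Bool), Dom_four_way_split n first inclusive → Spec_four_way_split n first inclusive (four_way_split n first inclusive)

-- ===== LEMMAS AND PROOFS =====

-- A's innermost loop visits exactly one l (the one with l = m), if it lies in the range.
lemma flatMap_pyRange_single (G : Int → List (List Int)) (m : Int) :
    ∀ (fuel : Nat) (a b : Int), (b - a).toNat = fuel →
      (PySem.List.pyRange a b 1).flatMap (fun l => if l = m then G l else []) =
        if a ≤ m ∧ m < b then G m else [] := by
  intro fuel
  induction fuel with
  | zero =>
    intro a b h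
    have hba : b ≤ a := by omega
    rw [PySem.List.pyRange_one_eq_nil hba]
    have : ¬ (a ≤ m ∧ m < b) := by omega
    simp [this]
  | succ f ih =>
    intro a b h
    have hab : a < b := by omega
    rw [PySem.List.pyRange_one_cons hab]
    simp only [List.flatMap_cons]
    rw [ih (a+1) b (by omega)]
    by_cases ham : a = m
    · subst ham
      have h2 : a ≤ a ∧ a < b := by omega
      simp [h2]
    · have h2 : ((a < m ∧ m < b) ↔ (a ≤ m ∧ m < b)) := by omega
      simp [ham, h2]

-- the permutation generators agree on a symbolic 4-element list
set_option maxHeartbeats 2000000 in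
lemma perms_eq (i j k l : Int) :
    fws_permutations [i, j, k, l] =
      (List.range 4).flatMap (fun p =>
        (List.range 4).flatMap fun q =>
          if q = p then [] else
          (List.range 4).flatMap fun r =>
            if r = p ∨ r = q then [] else
            [[[i,j,k,l].getD p 0, [i,j,k,l].getD q 0, [i,j,k,l].getD r 0, [i,j,k,l].getD (6-p-q-r) 0]]) := by
  rfl

-- both programs with the upper bound abstracted as hi; A's innermost loop collapsed via flatMap_pyRange_single
lemma fws_main (n first hi : Int) :
    ((PySem.List.pyRange first hi 1).flatMap fun i =>
      (PySem.List.pyRange i hi 1).flatMap fun j =>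
      (PySem.List.pyRange j hi 1).flatMap fun k =>
      (PySem.List.pyRange k hi 1).flatMap fun l =>
        if i + j + k + l = n then
          if i = j ∧ j = k ∧ k = l then [[i, j, k, l]]
          else fws_permutations [i, j, k, l]
        else []) =
    ((PySem.List.pyRange first hi 1).flatMap fun i =>
      (PySem.List.pyRange i hi 1).flatMap fun j =>
      (PySem.List.pyRange j hi 1).flatMap fun k =>
        if k ≤ n - i - j - k ∧ n - i - j - k < hi then
          if i = j ∧ j = k ∧ k = n - i - j - k then [[i, j, k, n - i - j - k]]
          else
            (List.range 4).flatMap fun p =>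
            (List.range 4).flatMap fun q =>
              if q = p then [] else
              (List.range 4).flatMap fun r =>
                if r = p ∨ r = q then [] else
                [[[i,j,k,n-i-j-k].getD p 0, [i,j,k,n-i-j-k].getD q 0,
                  [i,j,k,n-i-j-k].getD r 0, [i,j,k,n-i-j-k].getD (6-p-q-r) 0]]
        else []) := by
  congr 1
  funext i
  congr 1
  funext j
  congr 1
  funext k
  have hiff : ∀ l : Int, (i + j + k + l = n) ↔ (l = n - i - j - k) := by omega
  simp only [hiff]
  rw [flatMap_pyRange_single _ (n - i - j - k) ((hi - k).toNat) k hi rfl]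
  by_cases hc : k ≤ n - i - j - k ∧ n - i - j - k < hi
  · rw [if_pos hc, if_pos hc]
    by_cases he : i = j ∧ j = k ∧ k = n - i - j - k
    · rw [if_pos he, if_pos he]
    · rw [if_neg he, if_neg he, perms_eq]
  · rw [if_neg hc, if_neg hc]

-- ===== VERDICT (by name: the statement is the Claim_ definition above) =====
set_option maxHeartbeats 2000000 in
theorem four_way_split_spec : Claim_equal_four_way_split := by
  intro n first inclusive _
  show four_way_split n first inclusive = four_way_split_alt n first inclusive
  unfold four_way_split four_way_split_alt
  exact fws_main n first (n + if inclusive then 1 else 0)
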